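-- pv_equiv track=rewrite | github.com/saichitrav-dot/pmq-client-dashboard | test/app.py | find_submission_column
-- ===== SOURCE A (Python) =====
-- from typing import Any, Callable, Dict, Iterable, List, Optional, Tuple
--
-- def find_submission_column(normalized_columns: Dict[str, str], exact_keys: set[str], fuzzy_tokens: Iterable[str]) -> Optional[str]:
--     for key, original in normalized_columns.items():
--         if key in exact_keys:
--             return original
--     for key, original in normalized_columns.items():
--         if any(token in key for token in fuzzy_tokens):
--             return original
--     return None
-- ===== SOURCE B (Python) =====
-- def find_submission_column(normalized_columns, exact_keys, fuzzy_tokens):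
--     fuzzy_candidate = None
--     for key, original in normalized_columns.items():
--         if key in exact_keys:
--             return original
--         if fuzzy_candidate is None and any(token in key for token in fuzzy_tokens):
--             fuzzy_candidate = original
--     return fuzzy_candidate
-- ===== Notes on version B (the rewrite author's own statement) =====
-- stated objective: alternative
-- what changed: Replaced A's two sequential scans (exact pass, then fuzzy pass) by a single traversal that returns immediately on an exact match while recording the first fuzzy match as a candidate returned only after the loop.
import Mathlib
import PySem

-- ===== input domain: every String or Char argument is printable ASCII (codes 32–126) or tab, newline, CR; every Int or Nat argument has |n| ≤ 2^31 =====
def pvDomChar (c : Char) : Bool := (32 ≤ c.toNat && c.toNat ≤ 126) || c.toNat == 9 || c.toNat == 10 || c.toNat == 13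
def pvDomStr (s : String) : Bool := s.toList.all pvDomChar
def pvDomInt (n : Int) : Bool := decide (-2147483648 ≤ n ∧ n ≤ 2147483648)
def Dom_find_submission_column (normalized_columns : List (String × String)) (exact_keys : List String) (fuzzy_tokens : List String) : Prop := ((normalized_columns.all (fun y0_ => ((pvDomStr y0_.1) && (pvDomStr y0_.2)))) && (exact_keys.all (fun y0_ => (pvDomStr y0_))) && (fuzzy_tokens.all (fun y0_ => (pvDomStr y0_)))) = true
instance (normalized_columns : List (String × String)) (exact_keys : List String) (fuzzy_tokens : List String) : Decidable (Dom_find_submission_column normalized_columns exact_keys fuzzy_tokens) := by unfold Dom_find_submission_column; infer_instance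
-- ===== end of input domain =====

-- B merges A's two sequential scans into one traversal that records the first fuzzy match
-- as a candidate while still returning immediately on an exact match (objective: alternative).
-- ===== PORT A =====
-- first loop of A: return original of the first key in exact_keys
def pvExactScan : List (String × String) → List String → Option String
  | [], _ => none
  | (key, original) :: rest, exact_keys =>
    if exact_keys.contains key then some original else pvExactScan rest exact_keys

-- second loop of A: return original of the first key containing some token (Python 'token in key')
def pvFuzzyScan : List (String × String) → List String → Option String
  | [], _ => none
  | (key, original) :: rest, fuzzy_tokens =>
    if fuzzy_tokens.any (fun token => PySem.Str.isIn token key) then some original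
    else pvFuzzyScan rest fuzzy_tokens

def find_submission_column (normalized_columns : List (String × String)) (exact_keys : List String) (fuzzy_tokens : List String) : Option String :=
  match pvExactScan normalized_columns exact_keys with
  | some original => some original
  | none =>
    match pvFuzzyScan normalized_columns fuzzy_tokens with
    | some original => some original
    | none => none

-- ===== PORT B =====
-- B's single loop with the recorded fuzzy candidate as accumulator
def pvSingleScan : List (String × String) → List String → List String → Option String → Option String
  | [], _, _, fuzzy_candidate => fuzzy_candidate
  | (key, original) :: rest, exact_keys, fuzzy_tokens, fuzzy_candidate =>
    if exact_keys.contains key then some original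
    else
      pvSingleScan rest exact_keys fuzzy_tokens
        (if fuzzy_candidate.isNone &&
            fuzzy_tokens.any (fun token => PySem.Str.isIn token key)
         then some original else fuzzy_candidate)

def find_submission_column_alt (normalized_columns : List (String × String)) (exact_keys : List String) (fuzzy_tokens : List String) : Option String :=
  pvSingleScan normalized_columns exact_keys fuzzy_tokens none

-- ===== PRECONDITION & SPEC =====
def Spec_find_submission_column (normalized_columns : List (String × String)) (exact_keys : List String) (fuzzy_tokens : List String) (out : Option String) : Prop := out = find_submission_column_alt normalized_columns exact_keys fuzzy_tokens
instance (normalized_columns : List (String × String)) (exact_keys : List String) (fuzzy_tokens : List String) (out : Option String) : Decidable (Spec_find_submission_column normalized_columns exact_keys fuzzy_tokens out) := by unfold Spec_find_submission_column; infer_instance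

-- ===== CLAIM (what is proved, stated in full; the proofs are below) =====
def Claim_equal_find_submission_column : Prop := ∀ (normalized_columns : List (String × String)) (exact_keys : List String) (fuzzy_tokens : List String), Dom_find_submission_column normalized_columns exact_keys fuzzy_tokens → Spec_find_submission_column normalized_columns exact_keys fuzzy_tokens (find_submission_column normalized_columns exact_keys fuzzy_tokens)

-- ===== LEMMAS AND PROOFS =====
-- loop invariant: the single scan equals exact-scan, else the pending candidate, else fuzzy-scan
theorem pvSingleScan_eq (nc : List (String × String)) (ek fz : List String) (cand : Option String) :
    pvSingleScan nc ek fz cand =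
      match pvExactScan nc ek with
      | some o => some o
      | none => match cand with
                | some c => some c
                | none => pvFuzzyScan nc fz := by
  induction nc generalizing cand with
  | nil => cases cand <;> simp [pvSingleScan, pvExactScan, pvFuzzyScan]
  | cons p rest ih =>
    obtain ⟨key, original⟩ := p
    simp only [pvSingleScan, pvExactScan, pvFuzzyScan]
    by_cases hek : key ∈ ek
    · simp [hek]
    · by_cases hfz : ∃ x ∈ fz, PySem.Chars.isIn x.toList key.toList = true <;>
        cases cand <;> simp [hek, hfz, ih] <;> cases pvExactScan rest ek <;> simp

-- ===== VERDICT (by name: the statement is the Claim_ definition above) =====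
theorem find_submission_column_spec : Claim_equal_find_submission_column := by
  intro nc ek fz _
  unfold Spec_find_submission_column find_submission_column find_submission_column_alt
  rw [pvSingleScan_eq]
  cases pvExactScan nc ek <;> cases pvFuzzyScan nc fz <;> simp
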